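-- pv_equiv track=rewrite | github.com/capitalone/DataProfiler | dataprofiler/data_readers/json_data.py | _coalesce_dicts
-- ===== SOURCE A (Python) =====
-- def _coalesce_dicts(list_of_dicts):
--     """
--     Merge all the dictionaries into as few dictionaries as possible.
--
--     :param list_of_dicts: the list of dictionaries with one item in each dict
--     to be coalesced
--     :type list_of_dicts: list(dict)
--     :return: Coalesced list of dictionaries
--     """
--     coalesced_list_of_dicts = [{}]
--     for item in list_of_dicts:
--         found = False
--         for dict_items in coalesced_list_of_dicts:
--             if list(item.keys())[0] not in dict_items:
--                 dict_items.update(item)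
--                 found = True
--                 break
--         if not found:
--             coalesced_list_of_dicts.append(item)
--     return coalesced_list_of_dicts
-- ===== SOURCE B (Python) =====
-- def _coalesce_dicts(list_of_dicts):
--     """Coalesce single pass: per-key index sets + cached first-free index
--     replace A's rescans of the coalesced list (return value equal to A's;
--     unlike A, B does not alias or mutate the input dicts)."""
--     result = [{}]
--     occ = {}   # key -> set of indices of result dicts containing key
--     nxt = {}   # key -> lower bound for the first index whose dict lacks key
--     for item in list_of_dicts:
--         key = next(iter(item))
--         i = nxt.get(key, 0)
--         s = occ.get(key, set())
--         while i in s: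
--             i += 1
--         nxt[key] = i
--         if i == len(result):
--             result.append(dict(item))
--         else:
--             result[i].update(item)
--         for k in item:
--             occ.setdefault(k, set()).add(i)
--     return result
-- ===== Notes on version B (the rewrite author's own statement) =====
-- stated objective: alternative
-- what changed: A places each item by rescanning the coalesced list of dicts for the first one missing the key; B keeps, per key, the set of indices of coalesced dicts containing it plus a cached first-free index, and places each item by dictionary lookup in a single pass.
import Mathlib
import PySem

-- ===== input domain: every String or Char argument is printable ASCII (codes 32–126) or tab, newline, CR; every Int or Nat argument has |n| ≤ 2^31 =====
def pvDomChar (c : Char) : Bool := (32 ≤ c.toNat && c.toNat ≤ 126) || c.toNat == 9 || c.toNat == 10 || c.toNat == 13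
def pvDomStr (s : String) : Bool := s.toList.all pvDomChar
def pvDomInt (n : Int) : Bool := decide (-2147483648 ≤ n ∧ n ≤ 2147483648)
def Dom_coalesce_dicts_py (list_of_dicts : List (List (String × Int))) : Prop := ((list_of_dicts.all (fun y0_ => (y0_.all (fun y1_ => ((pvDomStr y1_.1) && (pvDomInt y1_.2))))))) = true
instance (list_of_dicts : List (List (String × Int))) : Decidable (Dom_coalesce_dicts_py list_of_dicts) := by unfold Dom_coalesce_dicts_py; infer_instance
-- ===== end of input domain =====

-- B replaces A's rescan of the coalesced list by per-key index sets with a cached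
-- first-free index (objective: alternative single-pass bookkeeping; equality is about
-- the RETURN value — Python A mutates/aliases the input dicts, B does not).

-- ===== PORT A =====

/-- `dict_items.update(item)` on an association-list dict (exact via PySem.Dict.update). -/
def pvUpd (d item : List (String × Int)) : List (String × Int) :=
  (PySem.Dict.update (PySem.Dict.mk d) item).items

/-- `key in dict_items` on an association-list dict. -/
def pvHas (d : List (String × Int)) (key : String) : Bool :=
  PySem.Dict.contains (PySem.Dict.mk d) key

/-- A's inner loop: walk `coalesced_list_of_dicts`, update (in place) the first dict
    not containing `key` and stop (`some` new list), `none` if every dict has `key`. -/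
def pvScan (key : String) (item : List (String × Int)) :
    List (List (String × Int)) → Option (List (List (String × Int)))
  | [] => none
  | d :: rest =>
    if pvHas d key then
      match pvScan key item rest with
      | some rest' => some (d :: rest')
      | none => none
    else
      some (pvUpd d item :: rest)

/-- A's outer loop body. -/
def pvAStep (acc : List (List (String × Int))) (item : List (String × Int)) :
    List (List (String × Int)) :=
  match item.head? with
  | none => acc        -- Python: `list(item.keys())[0]` raises IndexError; excluded by Pre_
  | some (key, _) =>
    match pvScan key item acc with
    | some acc' => acc'
    | none => acc ++ [item]

def coalesce_dicts_py (list_of_dicts : List (List (String × Int))) : List (List (String × Int)) :=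
  list_of_dicts.foldl pvAStep [[]]

-- ===== PORT B =====

/-- `while i in s: i += 1`; fuel `s.length` suffices: each successful test consumes a
    distinct element of the (duplicate-free) set. -/
def pvMex : Nat → Int → PySem.Set Int → Int
  | 0, i, _ => i
  | fuel+1, i, s => if PySem.Set.contains s i then pvMex fuel (i+1) s else i

/-- B's loop state: (result, occ, nxt). -/
abbrev PvBState :=
  List (List (String × Int)) × PySem.Dict String (PySem.Set Int) × PySem.Dict String Int

/-- B's loop body. -/
def pvBStep (st : PvBState) (item : List (String × Int)) : PvBState :=
  match item.head? with
  | none => st         -- Python: `next(iter(item))` raises StopIteration; excluded by Pre_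
  | some (key, _) =>
    let s := st.2.1.getD key PySem.Set.empty
    let i := pvMex s.length (st.2.2.getD key 0) s
    let result' :=
      if i = (st.1.length : Int) then st.1 ++ [item]   -- `result.append(dict(item))`
      else PySem.List.pySetD st.1 i (pvUpd (PySem.List.pyGetD st.1 i []) item)  -- `result[i].update(item)`
    let occ' := item.foldl
      (fun o p => o.insert p.1 (PySem.Set.add (o.getD p.1 PySem.Set.empty) i)) st.2.1
    (result', occ', st.2.2.insert key i)

def coalesce_dicts_py_alt (list_of_dicts : List (List (String × Int))) : List (List (String × Int)) :=
  (list_of_dicts.foldl pvBStep ([[]], PySem.Dict.empty, PySem.Dict.empty)).1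

-- ===== PRECONDITION & SPEC =====

-- Pre_ excludes exactly the lists containing an empty dict: there Python A raises
-- IndexError on `list(item.keys())[0]` (and B raises StopIteration on `next(iter(item))`).
def Pre_coalesce_dicts_py (list_of_dicts : List (List (String × Int))) : Prop :=
  ∀ item ∈ list_of_dicts, item ≠ []
instance (list_of_dicts : List (List (String × Int))) : Decidable (Pre_coalesce_dicts_py list_of_dicts) := by
  unfold Pre_coalesce_dicts_py; infer_instance

def pvWitness_coalesce_dicts_py : (List (List (String × Int))) :=
  [[("a", 1)], [("a", 2), ("b", 3)], [("b", 4)]]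

def Spec_coalesce_dicts_py (list_of_dicts : List (List (String × Int))) (out : List (List (String × Int))) : Prop := out = coalesce_dicts_py_alt list_of_dicts
instance (list_of_dicts : List (List (String × Int))) (out : List (List (String × Int))) : Decidable (Spec_coalesce_dicts_py list_of_dicts out) := by unfold Spec_coalesce_dicts_py; infer_instance

-- ===== CLAIM (what is proved, stated in full; the proofs are below) =====
def Claim_equal_coalesce_dicts_py : Prop := ∀ (list_of_dicts : List (List (String × Int))), Dom_coalesce_dicts_py list_of_dicts → Pre_coalesce_dicts_py list_of_dicts → Spec_coalesce_dicts_py list_of_dicts (coalesce_dicts_py list_of_dicts)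

-- ===== LEMMAS AND PROOFS =====

-- normal form for `key in d`
theorem pvHas_eq (d : List (String × Int)) (key : String) :
    pvHas d key = d.any (fun p => p.1 == key) := rfl

-- `k in d.update(ps)`: present before, or a key of ps
theorem pvUpd_contains {κ ν : Type} [BEq κ] [LawfulBEq κ] (ps : List (κ × ν))
    (d : PySem.Dict κ ν) (k : κ) :
    (PySem.Dict.update d ps).contains k = (d.contains k || ps.any (fun p => p.1 == k)) := by
  induction ps generalizing d with
  | nil => simp [PySem.Dict.update]
  | cons p t ih =>
    simp only [PySem.Dict.update, List.foldl_cons] at *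
    rw [ih, PySem.Dict.contains_insert]
    by_cases h : k = p.1
    · simp [h]
    · have hb : (k == p.1) = false := by simpa using h
      have hb' : (p.1 == k) = false := by simpa using fun hh => h hh.symm
      simp [hb, hb']

theorem pvHas_pvUpd (d item : List (String × Int)) (k : String) :
    pvHas (pvUpd d item) k = (pvHas d k || item.any (fun p => p.1 == k)) := by
  have h : PySem.Dict.mk (pvUpd d item) = PySem.Dict.update (PySem.Dict.mk d) item := rfl
  rw [pvHas, h, pvUpd_contains]
  rfl

-- the mex loop finds the least index ≥ the start that is outside the set
theorem pvMex_spec (s : PySem.Set Int) (i0 : Int) (fuel : Nat)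
    (hf : (s.filter (fun x => decide (i0 ≤ x))).length ≤ fuel) :
    i0 ≤ pvMex fuel i0 s ∧ PySem.Set.contains s (pvMex fuel i0 s) = false ∧
      ∀ j : Int, i0 ≤ j → j < pvMex fuel i0 s → PySem.Set.contains s j = true := by
  induction fuel generalizing i0 with
  | zero =>
    have hm : pvMex 0 i0 s = i0 := rfl
    rw [hm]
    have hnc : PySem.Set.contains s i0 = false := by
      by_contra h
      have hmem : i0 ∈ s := by
        have : PySem.Set.contains s i0 = true := by
          cases hcc : PySem.Set.contains s i0 with
          | false => exact absurd hcc h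
          | true => rfl
        simpa [PySem.Set.contains_iff] using this
      have hmf : i0 ∈ s.filter (fun x => decide (i0 ≤ x)) := by
        simp [List.mem_filter, hmem]
      have := List.length_pos_of_mem hmf
      omega
    exact ⟨le_refl _, hnc, fun j h1 h2 => by omega⟩
  | succ fuel ih =>
    by_cases hc : PySem.Set.contains s i0 = true
    · have hmem : i0 ∈ s := by simpa [PySem.Set.contains_iff] using hc
      have hsub : s.filter (fun x => decide (i0 + 1 ≤ x))
          = (s.filter (fun x => decide (i0 ≤ x))).filter (fun x => decide (x ≠ i0)) := by
        rw [List.filter_filter]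
        apply List.filter_congr
        intro x _
        by_cases h1 : x = i0 <;> by_cases h2 : i0 ≤ x <;> simp [h1, h2] <;> omega
      have hmemf : i0 ∈ s.filter (fun x => decide (i0 ≤ x)) := by simp [List.mem_filter, hmem]
      have hlt : ((s.filter (fun x => decide (i0 ≤ x))).filter (fun x => decide (x ≠ i0))).length
          < (s.filter (fun x => decide (i0 ≤ x))).length :=
        List.length_filter_lt_length_iff_exists.mpr ⟨i0, hmemf, by simp⟩
      have hlen : (s.filter (fun x => decide (i0 + 1 ≤ x))).length ≤ fuel := by
        rw [hsub]; omega
      obtain ⟨h1, h2, h3⟩ := ih (i0 + 1) hlen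
      have hm : pvMex (fuel+1) i0 s = pvMex fuel (i0+1) s := by simp only [pvMex, hc, if_true]
      rw [hm]
      refine ⟨by omega, h2, ?_⟩
      intro j hj1 hj2
      by_cases hji : j = i0
      · rw [hji]; exact hc
      · exact h3 j (by omega) hj2
    · have hcf : PySem.Set.contains s i0 = false := by
        cases hcc : PySem.Set.contains s i0 with
        | false => rfl
        | true => exact absurd hcc hc
      have hm : pvMex (fuel+1) i0 s = i0 := by simp only [pvMex, hcf]; simp
      rw [hm]
      exact ⟨le_refl _, hcf, fun j h1 h2 => by omega⟩

-- A's inner scan, characterised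
theorem pvScan_eq_none (key : String) (item : List (String × Int))
    (acc : List (List (String × Int))) (h : ∀ d ∈ acc, pvHas d key = true) :
    pvScan key item acc = none := by
  induction acc with
  | nil => rfl
  | cons d rest ih =>
    have hd : pvHas d key = true := h d (List.mem_cons_self)
    have hr : pvScan key item rest = none := ih (fun x hx => h x (List.mem_cons_of_mem _ hx))
    simp [pvScan, hd, hr]

theorem pvScan_eq_some (key : String) (item : List (String × Int))
    (acc : List (List (String × Int))) (n : Nat) (hn : n < acc.length)
    (hfree : pvHas (acc.getD n []) key = false)
    (hbefore : ∀ j : Nat, j < n → pvHas (acc.getD j []) key = true) :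
    pvScan key item acc = some (acc.set n (pvUpd (acc.getD n []) item)) := by
  induction acc generalizing n with
  | nil => simp at hn
  | cons d rest ih =>
    cases n with
    | zero =>
      simp only [List.getD_cons_zero] at hfree
      simp [pvScan, hfree]
    | succ m =>
      have hd : pvHas d key = true := by
        have := hbefore 0 (Nat.succ_pos m)
        simpa using this
      have hr := ih m (by simpa using hn) (by simpa using hfree)
        (fun j hj => by simpa using hbefore (j+1) (by omega))
      simp [pvScan, hd, hr]

-- keywise description of the fold maintaining `occ`
theorem pvOccFold_getD (item : List (String × Int)) (occ : PySem.Dict String (PySem.Set Int))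
    (m : Int) (k : String) :
    (item.foldl (fun o p => o.insert p.1 (PySem.Set.add (o.getD p.1 PySem.Set.empty) m)) occ).getD k PySem.Set.empty
      = if item.any (fun p => p.1 == k) then PySem.Set.add (occ.getD k PySem.Set.empty) m
        else occ.getD k PySem.Set.empty := by
  induction item generalizing occ with
  | nil => simp
  | cons p t ih =>
    simp only [List.foldl_cons, List.any_cons]
    rw [ih]
    by_cases hk : k = p.1
    · have hb : (p.1 == k) = true := by simp [hk.symm]
      rw [PySem.Dict.getD_insert, if_pos hk, hk]
      by_cases ht : t.any (fun q => q.1 == k) = true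
      · rw [hk] at ht
        rw [if_pos ht, if_pos (by simp),
          PySem.Set.add_of_mem ((PySem.Set.mem_add _ _ _).mpr (Or.inr rfl))]
      · rw [hk] at ht
        rw [if_neg ht, if_pos (by simp)]
    · have hb : (p.1 == k) = false := by simpa using fun hh => hk hh.symm
      rw [PySem.Dict.getD_insert, if_neg hk]
      simp only [hb, Bool.false_or]

-- the invariant tying B's state to the list A maintains
def PvOccOK (res : List (List (String × Int))) (occ : PySem.Dict String (PySem.Set Int)) : Prop :=
  ∀ (k : String) (i : Int),
    PySem.Set.contains (occ.getD k PySem.Set.empty) i = true ↔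
      0 ≤ i ∧ i < (res.length : Int) ∧ pvHas (res.getD i.toNat []) k = true

def PvNxtOK (occ : PySem.Dict String (PySem.Set Int)) (nxt : PySem.Dict String Int) : Prop :=
  ∀ k : String, 0 ≤ nxt.getD k 0 ∧
    ∀ j : Int, 0 ≤ j → j < nxt.getD k 0 →
      PySem.Set.contains (occ.getD k PySem.Set.empty) j = true

def PvInv (st : PvBState) : Prop := PvOccOK st.1 st.2.1 ∧ PvNxtOK st.2.1 st.2.2

theorem pv_step (st : PvBState) (hinv : PvInv st) (item : List (String × Int)) :
    (pvBStep st item).1 = pvAStep st.1 item ∧ PvInv (pvBStep st item) := by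
  obtain ⟨acc, occ, nxt⟩ := st
  obtain ⟨hocc, hnxt⟩ := hinv
  dsimp only at hocc hnxt
  cases item with
  | nil => exact ⟨rfl, ⟨hocc, hnxt⟩⟩
  | cons p t =>
    obtain ⟨key, val⟩ := p
    -- names for B's intermediate values
    set s : PySem.Set Int := occ.getD key PySem.Set.empty with hs
    set i0 : Int := nxt.getD key 0 with hi0
    set m : Int := pvMex s.length i0 s with hm
    have hstep : pvBStep (acc, occ, nxt) ((key, val) :: t) =
        ((if m = (acc.length : Int) then acc ++ [(key, val) :: t]
          else PySem.List.pySetD acc m (pvUpd (PySem.List.pyGetD acc m []) ((key, val) :: t))),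
         ((key, val) :: t).foldl
           (fun o q => o.insert q.1 (PySem.Set.add (o.getD q.1 PySem.Set.empty) m)) occ,
         nxt.insert key m) := rfl
    obtain ⟨hm1, hm2, hm3⟩ := pvMex_spec s i0 s.length (List.length_filter_le _ _)
    obtain ⟨h00, hlow⟩ := hnxt key
    rw [← hi0] at h00 hlow
    rw [← hs] at hlow
    rw [← hm] at hm1 hm2 hm3
    have hall : ∀ j : Int, 0 ≤ j → j < m → PySem.Set.contains s j = true := by
      intro j hj1 hj2
      by_cases hji : j < i0
      · exact hlow j hj1 hji
      · exact hm3 j (by omega) hj2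
    have h0m : 0 ≤ m := le_trans h00 hm1
    have hallHas : ∀ j : Int, 0 ≤ j → j < m →
        j < (acc.length : Int) ∧ pvHas (acc.getD j.toNat []) key = true := by
      intro j hj1 hj2
      have := (hocc key j).mp (hall j hj1 hj2)
      exact ⟨this.2.1, this.2.2⟩
    have hmlen : m ≤ (acc.length : Int) := by
      by_contra hcon
      have := (hallHas (acc.length : Int) (by omega) (by omega)).1
      omega
    have hgetDapp : ∀ nn : Nat, (acc ++ [(key, val) :: t]).getD nn []
        = if nn < acc.length then acc.getD nn []
          else if nn = acc.length then (key, val) :: t else [] := by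
      intro nn
      by_cases h : nn < acc.length
      · simp [List.getD_eq_getElem?_getD, List.getElem?_append_left h, h]
      · by_cases h2 : nn = acc.length
        · subst h2
          simp [List.getD_eq_getElem?_getD]
        · have h3 : acc.length ≤ nn := by omega
          have h4 : [(key, val) :: t][nn - acc.length]? = none :=
            List.getElem?_eq_none_iff.mpr (by simp; omega)
          simp [List.getD_eq_getElem?_getD, List.getElem?_append_right h3, h, h2, h4]
    have hmono : ∀ (sk : PySem.Set Int) (j : Int), PySem.Set.contains sk j = true →
        PySem.Set.contains (PySem.Set.add sk m) j = true := by
      intro sk j hj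
      rw [PySem.Set.contains_iff] at hj ⊢
      exact (PySem.Set.mem_add _ _ _).mpr (Or.inl hj)
    have hNxtOK : PvNxtOK (((key, val) :: t).foldl
        (fun o q => o.insert q.1 (PySem.Set.add (o.getD q.1 PySem.Set.empty) m)) occ)
        (nxt.insert key m) := by
      intro k
      simp only [pvOccFold_getD, PySem.Dict.getD_insert]
      by_cases hk : k = key
      · rw [if_pos hk, hk]
        refine ⟨h0m, ?_⟩
        intro j hj1 hj2
        rw [if_pos (by simp)]
        exact hmono s j (hall j hj1 hj2)
      · rw [if_neg hk]
        obtain ⟨ha, hb⟩ := hnxt k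
        refine ⟨ha, ?_⟩
        intro j hj1 hj2
        by_cases hany : ((key, val) :: t).any (fun q => q.1 == k) = true
        · rw [if_pos hany]
          exact hmono _ j (hb j hj1 hj2)
        · rw [if_neg hany]
          exact hb j hj1 hj2
    by_cases hcase : m = (acc.length : Int)
    · -- append: every coalesced dict already holds `key`
      have hAll : ∀ d ∈ acc, pvHas d key = true := by
        intro d hd
        obtain ⟨j, hj, rfl⟩ := List.mem_iff_getElem.mp hd
        have h2 := (hallHas (j : Int) (by omega) (by omega)).2
        have h3 : ((j : Int)).toNat = j := by omega
        rw [h3] at h2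
        rwa [List.getD_eq_getElem acc [] hj] at h2
      have hA : pvAStep acc ((key, val) :: t) = acc ++ [(key, val) :: t] := by
        simp [pvAStep, pvScan_eq_none key ((key, val) :: t) acc hAll]
      refine ⟨?_, ?_, ?_⟩
      · rw [hstep, hA]
        simp [hcase]
      · -- PvOccOK
        intro k i
        rw [hstep]
        show PySem.Set.contains ((((key, val) :: t).foldl
            (fun o q => o.insert q.1 (PySem.Set.add (o.getD q.1 PySem.Set.empty) m)) occ).getD k
            PySem.Set.empty) i = true ↔ _
        rw [pvOccFold_getD]
        have hres : (if m = (acc.length : Int) then acc ++ [(key, val) :: t]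
            else PySem.List.pySetD acc m (pvUpd (PySem.List.pyGetD acc m []) ((key, val) :: t)))
            = acc ++ [(key, val) :: t] := if_pos hcase
        rw [hres]
        have hlen' : ((acc ++ [(key, val) :: t]).length : Int) = (acc.length : Int) + 1 := by
          simp
        rw [hlen']
        by_cases hany : ((key, val) :: t).any (fun q => q.1 == k) = true
        · rw [if_pos hany]
          rw [PySem.Set.contains_iff, PySem.Set.mem_add]
          constructor
          · rintro (hin | rfl)
            · have h2 := (hocc k i).mp (by rwa [PySem.Set.contains_iff])
              refine ⟨h2.1, by omega, ?_⟩
              rw [hgetDapp]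
              have h4 : i.toNat < acc.length := by omega
              rw [if_pos h4]
              exact h2.2.2
            · refine ⟨h0m, by omega, ?_⟩
              rw [hgetDapp, hcase]
              have h4 : ¬ ((acc.length : Int).toNat < acc.length) := by omega
              rw [if_neg h4, if_pos (by omega)]
              rw [pvHas_eq]
              exact hany
          · rintro ⟨hi1, hi2, hi3⟩
            by_cases h4 : i.toNat < acc.length
            · left
              rw [← PySem.Set.contains_iff]
              exact (hocc k i).mpr ⟨hi1, by omega, by rwa [hgetDapp, if_pos h4] at hi3⟩
            · right
              omega
        · rw [if_neg hany]
          constructor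
          · intro hin
            have h2 := (hocc k i).mp hin
            refine ⟨h2.1, by omega, ?_⟩
            rw [hgetDapp, if_pos (by omega)]
            exact h2.2.2
          · rintro ⟨hi1, hi2, hi3⟩
            apply (hocc k i).mpr
            refine ⟨hi1, ?_, ?_⟩
            · by_contra hcon
              have h4 : i.toNat = acc.length := by omega
              rw [hgetDapp, if_neg (by omega), if_pos h4, pvHas_eq] at hi3
              exact hany hi3
            · have h5 : i < (acc.length : Int) := by
                by_contra hcon
                have h4 : i.toNat = acc.length := by omega
                rw [hgetDapp, if_neg (by omega), if_pos h4, pvHas_eq] at hi3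
                exact hany hi3
              rwa [hgetDapp, if_pos (by omega)] at hi3
      · exact hNxtOK
    · -- in-place update at index m (the first dict lacking `key`)
      have hlt2 : m < (acc.length : Int) := lt_of_le_of_ne hmlen hcase
      have hfree : pvHas (acc.getD m.toNat []) key = false := by
        cases hh : pvHas (acc.getD m.toNat []) key with
        | false => rfl
        | true =>
          have := (hocc key m).mpr ⟨h0m, hlt2, hh⟩
          rw [this] at hm2
          exact absurd hm2 (by simp)
      have hbefore : ∀ j : Nat, j < m.toNat → pvHas (acc.getD j []) key = true := by
        intro j hj
        have h2 := (hallHas (j : Int) (by omega) (by omega)).2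
        have h3 : ((j : Int)).toNat = j := by omega
        rwa [h3] at h2
      have hscan := pvScan_eq_some key ((key, val) :: t) acc m.toNat (by omega) hfree hbefore
      have hA : pvAStep acc ((key, val) :: t)
          = acc.set m.toNat (pvUpd (acc.getD m.toNat []) ((key, val) :: t)) := by
        simp [pvAStep, hscan]
      have hBres : (if m = (acc.length : Int) then acc ++ [(key, val) :: t]
          else PySem.List.pySetD acc m (pvUpd (PySem.List.pyGetD acc m []) ((key, val) :: t)))
          = acc.set m.toNat (pvUpd (acc.getD m.toNat []) ((key, val) :: t)) := by
        rw [if_neg hcase, PySem.List.pySetD_of_nonneg _ _ h0m,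
          PySem.List.pyGetD_of_nonneg _ _ h0m]
      have hgetDset : ∀ nn : Nat,
          (acc.set m.toNat (pvUpd (acc.getD m.toNat []) ((key, val) :: t))).getD nn []
          = if nn = m.toNat then pvUpd (acc.getD m.toNat []) ((key, val) :: t)
            else acc.getD nn [] := by
        intro nn
        by_cases h : nn = m.toNat
        · subst h
          rw [if_pos rfl]
          rw [List.getD_eq_getElem?_getD, List.getElem?_set, if_pos rfl,
            if_pos (by omega)]
          rfl
        · rw [if_neg h, List.getD_eq_getElem?_getD, List.getElem?_set,
            if_neg (fun hh => h hh.symm), ← List.getD_eq_getElem?_getD]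
      refine ⟨?_, ?_, ?_⟩
      · rw [hstep, hA]
        exact hBres
      · -- PvOccOK
        intro k i
        rw [hstep]
        show PySem.Set.contains ((((key, val) :: t).foldl
            (fun o q => o.insert q.1 (PySem.Set.add (o.getD q.1 PySem.Set.empty) m)) occ).getD k
            PySem.Set.empty) i = true ↔ _
        rw [pvOccFold_getD, hBres]
        have hlen' : ((acc.set m.toNat (pvUpd (acc.getD m.toNat []) ((key, val) :: t))).length : Int)
            = (acc.length : Int) := by simp
        rw [hlen']
        by_cases hany : ((key, val) :: t).any (fun q => q.1 == k) = true
        · rw [if_pos hany]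
          rw [PySem.Set.contains_iff, PySem.Set.mem_add]
          constructor
          · rintro (hin | rfl)
            · have h2 := (hocc k i).mp (by rwa [PySem.Set.contains_iff])
              refine ⟨h2.1, h2.2.1, ?_⟩
              rw [hgetDset]
              by_cases h4 : i.toNat = m.toNat
              · rw [if_pos h4, pvHas_pvUpd]
                simp [hany]
              · rw [if_neg h4]
                exact h2.2.2
            · refine ⟨h0m, hlt2, ?_⟩
              rw [hgetDset, if_pos rfl, pvHas_pvUpd]
              simp [hany]
          · rintro ⟨hi1, hi2, hi3⟩
            by_cases h4 : i = m
            · right; exact h4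
            · left
              rw [← PySem.Set.contains_iff]
              apply (hocc k i).mpr
              refine ⟨hi1, hi2, ?_⟩
              rwa [hgetDset, if_neg (by omega)] at hi3
        · rw [if_neg hany]
          have hanyf : ((key, val) :: t).any (fun q => q.1 == k) = false := by
            cases hh : ((key, val) :: t).any (fun q => q.1 == k) with
            | false => rfl
            | true => exact absurd hh hany
          have h3 : ∀ nn : Nat,
              pvHas ((acc.set m.toNat (pvUpd (acc.getD m.toNat []) ((key, val) :: t))).getD nn []) k
              = pvHas (acc.getD nn []) k := by
            intro nn
            rw [hgetDset]
            by_cases h : nn = m.toNat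
            · rw [if_pos h, pvHas_pvUpd, hanyf, h]
              simp
            · rw [if_neg h]
          rw [hocc k i, h3]
      · exact hNxtOK

theorem pv_fold (l : List (List (String × Int))) (st : PvBState) (hinv : PvInv st) :
    (l.foldl pvBStep st).1 = l.foldl pvAStep st.1 ∧ PvInv (l.foldl pvBStep st) := by
  induction l generalizing st with
  | nil => exact ⟨rfl, hinv⟩
  | cons x xs ih =>
    obtain ⟨h1, h2⟩ := pv_step st hinv x
    obtain ⟨h3, h4⟩ := ih (pvBStep st x) h2
    exact ⟨by simpa [h1] using h3, h4⟩

theorem pv_init_inv : PvInv (([[]], PySem.Dict.empty, PySem.Dict.empty) : PvBState) := by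
  constructor
  · intro k i
    simp [PySem.Dict.getD_empty, PySem.Set.empty, pvHas_eq]
  · intro k
    simp [PySem.Dict.getD_empty]

-- ===== VERDICT (by name: the statement is the Claim_ definition above) =====
theorem coalesce_dicts_py_spec : Claim_equal_coalesce_dicts_py := by
  intro l _ _
  unfold Spec_coalesce_dicts_py coalesce_dicts_py coalesce_dicts_py_alt
  exact (pv_fold l _ pv_init_inv).1.symm
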